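-- pv_equiv track=rewrite | github.com/zwep/advent_of_code | adventofcode_2024/day_21.py | extract_all_paths
-- ===== SOURCE A (Python) =====
-- def extract_all_paths(previous_nodes, start_node, target_node):
--     # Stack to keep track of current path exploration
--     stack = [(target_node, [target_node])]  # (current_node, current_path)
--     all_paths = []
--
--     while stack:
--         current_node, path = stack.pop()
--
--         # If the current node is the start node, we've found a complete path
--         if current_node == start_node:
--             all_paths.append(path[::-1])  # Reverse to get the path from start to target
--             continue
--
--         # Explore previous nodes for the current node
--         if current_node in previous_nodes:
--             for prev_node in previous_nodes[current_node]:
--                 stack.append((prev_node, path + [prev_node]))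
--
--     return all_paths
-- ===== SOURCE B (Python) =====
-- def extract_all_paths(previous_nodes, start_node, target_node):
--     # Recursive DFS instead of an explicit stack; same path emission order.
--     all_paths = []
--
--     def helper(node, path):
--         if node == start_node:
--             all_paths.append(path[::-1])
--             return
--         for prev_node in reversed(previous_nodes.get(node, [])):
--             helper(prev_node, path + [prev_node])
--
--     helper(target_node, [target_node])
--     return all_paths
-- ===== Notes on version B (the rewrite author's own statement) =====
-- stated objective: simpler
-- what changed: Replaces A's explicit while-loop stack of (node, partial-path) pairs with a plain recursive DFS helper that iterates predecessors in reversed order, reproducing the stack's LIFO emission order exactly.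
import Mathlib
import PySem

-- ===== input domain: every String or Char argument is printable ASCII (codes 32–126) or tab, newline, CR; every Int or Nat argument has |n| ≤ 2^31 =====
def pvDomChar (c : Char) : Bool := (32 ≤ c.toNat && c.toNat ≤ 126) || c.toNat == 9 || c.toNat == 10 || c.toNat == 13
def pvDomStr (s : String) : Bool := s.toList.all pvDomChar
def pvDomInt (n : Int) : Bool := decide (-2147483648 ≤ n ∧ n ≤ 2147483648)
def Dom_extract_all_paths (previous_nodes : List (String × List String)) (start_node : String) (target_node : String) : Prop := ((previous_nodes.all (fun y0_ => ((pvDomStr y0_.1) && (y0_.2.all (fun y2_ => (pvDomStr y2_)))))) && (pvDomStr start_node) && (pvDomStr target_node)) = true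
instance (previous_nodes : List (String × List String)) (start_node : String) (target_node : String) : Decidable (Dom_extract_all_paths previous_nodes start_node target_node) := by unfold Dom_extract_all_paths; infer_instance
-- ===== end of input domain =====

-- B replaces A's explicit stack loop with a recursive DFS (reversed predecessor order
-- reproduces the stack's LIFO emission order); same output, simpler decomposition.
-- Both ports carry a common generous fuel as a totality guard (Python A diverges only on
-- predecessor graphs with a cycle reachable from the target; on terminating inputs the
-- fuel is never exhausted); the equivalence theorem holds for every fuel value.

-- fuel: generous upper bound on the number of stack pops whenever the Python terminates
def pvFuel (previous_nodes : List (String × List String)) : Nat :=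
  let s := previous_nodes.foldl (fun a kv => a + kv.2.length + 1) 2
  s ^ s

-- ===== PORT A =====
-- while-loop over an explicit stack (head of the list = top of the stack; Python pushes
-- the predecessor list in order, so its reverse goes on top), fuel only for totality
def pvLoopA (previous_nodes : List (String × List String)) (start_node : String) :
    Nat → List (String × List String) → List (List String) → List (List String)
  | 0, _, acc => acc
  | _ + 1, [], acc => acc
  | f + 1, (node, path) :: rest, acc =>
    if node == start_node then
      pvLoopA previous_nodes start_node f rest (acc ++ [path.reverse])
    else
      match PySem.Dict.get? (PySem.Dict.mk previous_nodes) node with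
      | none => pvLoopA previous_nodes start_node f rest acc
      | some lst =>
          pvLoopA previous_nodes start_node f
            ((lst.map (fun p => (p, path ++ [p]))).reverse ++ rest) acc

def extract_all_paths (previous_nodes : List (String × List String)) (start_node : String) (target_node : String) : List (List String) :=
  pvLoopA previous_nodes start_node (pvFuel previous_nodes) [(target_node, [target_node])] []

-- ===== PORT B =====
-- recursive DFS; fuel is threaded through the sequential child calls (leftover fuel is
-- returned, with the invariant leftover ≤ input carried in the subtype for termination)
mutual
def pvDfsB (previous_nodes : List (String × List String)) (start_node : String) :
    (f : Nat) → String → List String → {r : List (List String) × Nat // r.2 ≤ f}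
  | 0, _, _ => ⟨([], 0), le_refl 0⟩
  | f + 1, node, path =>
    if node == start_node then ⟨([path.reverse], f), by omega⟩
    else
      match PySem.Dict.get? (PySem.Dict.mk previous_nodes) node with
      | none => ⟨([], f), by omega⟩
      | some lst =>
          match pvDfsChildren previous_nodes start_node f lst.reverse path with
          | ⟨r, h⟩ => ⟨r, by omega⟩
  termination_by f _ _ => (f, 0)
  decreasing_by exact Prod.Lex.left _ _ (Nat.lt_succ_self f)
def pvDfsChildren (previous_nodes : List (String × List String)) (start_node : String) :
    (f : Nat) → List String → List String → {r : List (List String) × Nat // r.2 ≤ f}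
  | f, [], _ => ⟨([], f), le_refl f⟩
  | f, p :: ps, path =>
    match pvDfsB previous_nodes start_node f p (path ++ [p]) with
    | ⟨(out1, f1), h1⟩ =>
      match pvDfsChildren previous_nodes start_node f1 ps path with
      | ⟨(out2, f2), h2⟩ => ⟨(out1 ++ out2, f2), by omega⟩
  termination_by f l _ => (f, l.length + 1)
  decreasing_by
    · exact Prod.Lex.right _ (by omega)
    · rcases Nat.lt_or_ge f1 f with h | h
      · exact Prod.Lex.left _ _ h
      · have he : f1 = f := by omega
        rw [he]; exact Prod.Lex.right _ (by simp)
end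

def extract_all_paths_alt (previous_nodes : List (String × List String)) (start_node : String) (target_node : String) : List (List String) :=
  (pvDfsB previous_nodes start_node (pvFuel previous_nodes) target_node [target_node]).val.1

-- ===== PRECONDITION & SPEC =====
def Spec_extract_all_paths (previous_nodes : List (String × List String)) (start_node : String) (target_node : String) (out : List (List String)) : Prop := out = extract_all_paths_alt previous_nodes start_node target_node
instance (previous_nodes : List (String × List String)) (start_node : String) (target_node : String) (out : List (List String)) : Decidable (Spec_extract_all_paths previous_nodes start_node target_node out) := by unfold Spec_extract_all_paths; infer_instance

-- ===== CLAIM (what is proved, stated in full; the proofs are below) =====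
def Claim_equal_extract_all_paths : Prop := ∀ (previous_nodes : List (String × List String)) (start_node : String) (target_node : String), Dom_extract_all_paths previous_nodes start_node target_node → Spec_extract_all_paths previous_nodes start_node target_node (extract_all_paths previous_nodes start_node target_node)

-- ===== LEMMAS AND PROOFS =====

lemma pvLoopA_nil (previous_nodes : List (String × List String)) (start_node : String)
    (f : Nat) (acc : List (List String)) :
    pvLoopA previous_nodes start_node f [] acc = acc := by
  cases f <;> simp [pvLoopA]

-- popping one stack entry runs the DFS of that entry: the emitted paths are appended to
-- the accumulator and the loop resumes on the rest of the stack with the leftover fuel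
lemma pvLoop_eq_dfs (previous_nodes : List (String × List String)) (start_node : String) :
    ∀ f node path rest acc,
      pvLoopA previous_nodes start_node f ((node, path) :: rest) acc
        = pvLoopA previous_nodes start_node
            (pvDfsB previous_nodes start_node f node path).val.2 rest
            (acc ++ (pvDfsB previous_nodes start_node f node path).val.1) := by
  intro f
  induction f using Nat.strong_induction_on with
  | _ f IH =>
    intro node path rest acc
    match f with
    | 0 => simp [pvLoopA, pvDfsB]
    | g + 1 =>
      have aux : ∀ children path' g', g' ≤ g → ∀ rest' acc',
          pvLoopA previous_nodes start_node g'
              ((children.map (fun p => (p, path' ++ [p]))) ++ rest') acc'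
            = pvLoopA previous_nodes start_node
                (pvDfsChildren previous_nodes start_node g' children path').val.2 rest'
                (acc' ++ (pvDfsChildren previous_nodes start_node g' children path').val.1) := by
        intro children
        induction children with
        | nil => intro path' g' hg rest' acc'; simp [pvDfsChildren]
        | cons p ps ihps =>
          intro path' g' hg rest' acc'
          simp only [List.map_cons, List.cons_append]
          rw [IH g' (by omega) p (path' ++ [p]) _ acc']
          rw [ihps path' _ (le_trans (pvDfsB previous_nodes start_node g' p (path' ++ [p])).property hg)]
          simp [pvDfsChildren, List.append_assoc]
      simp only [pvLoopA, pvDfsB]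
      by_cases hs : (node == start_node) = true
      · simp [hs]
      · simp only [hs, Bool.false_eq_true, if_false]
        cases hlk : PySem.Dict.get? (PySem.Dict.mk previous_nodes) node with
        | none => simp
        | some lst =>
          simp only []
          rw [← List.map_reverse]
          exact aux lst.reverse path g (le_refl g) rest acc

-- ===== VERDICT (by name: the statement is the Claim_ definition above) =====
theorem extract_all_paths_spec : Claim_equal_extract_all_paths := by
  intro previous_nodes start_node target_node _
  unfold Spec_extract_all_paths extract_all_paths extract_all_paths_alt
  rw [pvLoop_eq_dfs, pvLoopA_nil]
  simp
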